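-- pv_equiv track=rewrite | github.com/AnticPan/Hierarchical-GEC | utils/recoder.py | _relation_p_and_ts
-- ===== SOURCE A (Python) =====
-- from typing import List, NamedTuple, Set, Dict, Union, Tuple
--
-- def _relation_p_and_ts(p: Tuple[int], ts: List[Tuple[int]]):
--     assert len(p) == 2
--     predict_start, predict_end = p
--     cross = False
--     for (target_start, target_end) in ts:
--         if target_start == predict_start and target_end == predict_end:
--             return "right"
--         elif target_start>= predict_start and target_end <= predict_end:
--             return "t_in_p"
--         elif target_start <= predict_start and target_end >= predict_end:
--             return "p_in_t"
--         elif (target_end <= predict_end and target_end >= predict_start) or \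
--             (target_start >= predict_start and target_start<= predict_end):
--             cross = True
--     if cross:
--         return "cross"
--     return "out"
-- ===== SOURCE B (Python) =====
-- def _relation_p_and_ts(p, ts):
--     assert len(p) == 2
--     ps, pe = p
--
--     def classify(t):
--         s, e = t
--         if s == ps and e == pe:
--             return "right"
--         if s >= ps and e <= pe:
--             return "t_in_p"
--         if s <= ps and e >= pe:
--             return "p_in_t"
--         return None
--
--     strong = next((r for t in ts if (r := classify(t)) is not None), None)
--     if strong is not None:
--         return strong
--     if any((e <= pe and e >= ps) or (s >= ps and s <= pe) for s, e in ts):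
--         return "cross"
--     return "out"
-- ===== Notes on version B (the rewrite author's own statement) =====
-- stated objective: alternative
-- what changed: Replaces the single loop carrying a cross flag and early returns with a find-first pass for a strong relation (via a classify helper and next()) followed by a separate any() pass for the cross overlap.
import Mathlib
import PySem

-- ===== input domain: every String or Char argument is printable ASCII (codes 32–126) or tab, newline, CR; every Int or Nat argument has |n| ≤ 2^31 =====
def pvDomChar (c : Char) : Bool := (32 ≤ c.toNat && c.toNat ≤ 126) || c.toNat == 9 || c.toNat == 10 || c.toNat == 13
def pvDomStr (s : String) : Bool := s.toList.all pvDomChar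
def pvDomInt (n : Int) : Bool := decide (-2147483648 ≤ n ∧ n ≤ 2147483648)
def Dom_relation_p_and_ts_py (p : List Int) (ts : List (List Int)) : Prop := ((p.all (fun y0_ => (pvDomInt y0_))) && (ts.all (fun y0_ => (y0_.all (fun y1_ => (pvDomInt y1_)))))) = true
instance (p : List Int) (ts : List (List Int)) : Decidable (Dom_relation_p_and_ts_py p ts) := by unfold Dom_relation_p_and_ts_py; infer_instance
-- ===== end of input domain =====

-- B replaces A's single loop-with-cross-flag by a find-first strong-relation pass plus a
-- separate any-cross pass (alternative decomposition, same cost). Return-value equivalence only.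

-- ===== PORT A =====
-- A's loop: scan ts in order, early-return on a strong relation, carry the cross flag.
def relAloop (ps pe : Int) (ts : List (List Int)) (cross : Bool) : String :=
  match ts with
  | [] => if cross then "cross" else "out"
  | t :: rest =>
    match t with
    | [s, e] =>
      if s = ps ∧ e = pe then "right"
      else if s ≥ ps ∧ e ≤ pe then "t_in_p"
      else if s ≤ ps ∧ e ≥ pe then "p_in_t"
      else if (e ≤ pe ∧ e ≥ ps) ∨ (s ≥ ps ∧ s ≤ pe) then relAloop ps pe rest true
      else relAloop ps pe rest cross
    | _ => ""  -- tuple unpacking raises ValueError in Python; excluded by Pre_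

def relation_p_and_ts_py (p : List Int) (ts : List (List Int)) : String :=
  match p with
  | [ps, pe] => relAloop ps pe ts false
  | _ => ""  -- assert len(p) == 2 fails; excluded by Pre_

-- ===== PORT B =====
-- B's classify helper: the strong relation of one target, or none.
def classifyB (ps pe s e : Int) : Option String :=
  if s = ps ∧ e = pe then some "right"
  else if s ≥ ps ∧ e ≤ pe then some "t_in_p"
  else if s ≤ ps ∧ e ≥ pe then some "p_in_t"
  else none

-- B's first pass: first target with a strong relation (next(...) over the generator).
def firstStrong (ps pe : Int) : List (List Int) → Option String
  | [] => none
  | t :: rest =>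
    match t with
    | [s, e] =>
      match classifyB ps pe s e with
      | some r => some r
      | none => firstStrong ps pe rest
    | _ => some ""  -- unpacking raises in Python; excluded by Pre_

-- B's second pass predicate: the cross overlap condition of one target.
def crossCond (ps pe : Int) (t : List Int) : Bool :=
  match t with
  | [s, e] => decide ((e ≤ pe ∧ e ≥ ps) ∨ (s ≥ ps ∧ s ≤ pe))
  | _ => false  -- unpacking raises in Python; excluded by Pre_

def relation_p_and_ts_py_alt (p : List Int) (ts : List (List Int)) : String :=
  match p with
  | [ps, pe] =>
    match firstStrong ps pe ts with
    | some r => r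
    | none => if ts.any (crossCond ps pe) then "cross" else "out"
  | _ => ""  -- assert fails; excluded by Pre_

-- ===== PRECONDITION & SPEC =====
-- strongT: the target yields one of the three early-return relations (used only by Pre_).
def strongT (ps pe : Int) (t : List Int) : Bool :=
  match t with
  | [s, e] => decide (s = ps ∧ e = pe ∨ (s ≥ ps ∧ e ≤ pe) ∨ (s ≤ ps ∧ e ≥ pe))
  | _ => false

-- Pre_ excludes exactly the inputs where Python raises: p not a pair (AssertionError), or a
-- target that is not a pair and is reached, i.e. not preceded by a strong early-return target
-- (ValueError on tuple unpacking).
def Pre_relation_p_and_ts_py (p : List Int) (ts : List (List Int)) : Prop :=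
  match p with
  | [ps, pe] =>
    ∀ i < ts.length, (ts.getD i []).length = 2 ∨ ∃ j < i, strongT ps pe (ts.getD j []) = true
  | _ => False
instance (p : List Int) (ts : List (List Int)) : Decidable (Pre_relation_p_and_ts_py p ts) := by
  unfold Pre_relation_p_and_ts_py
  rcases p with _ | ⟨ps, _ | ⟨pe, _ | _⟩⟩ <;> infer_instance

def pvWitness_relation_p_and_ts_py : List Int × List (List Int) := ([0, 5], [[6, 7], [1, 4]])

def Spec_relation_p_and_ts_py (p : List Int) (ts : List (List Int)) (out : String) : Prop := out = relation_p_and_ts_py_alt p ts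
instance (p : List Int) (ts : List (List Int)) (out : String) : Decidable (Spec_relation_p_and_ts_py p ts out) := by unfold Spec_relation_p_and_ts_py; infer_instance

-- ===== CLAIM (what is proved, stated in full; the proofs are below) =====
def Claim_equal_relation_p_and_ts_py : Prop := ∀ (p : List Int) (ts : List (List Int)), Dom_relation_p_and_ts_py p ts → Pre_relation_p_and_ts_py p ts → Spec_relation_p_and_ts_py p ts (relation_p_and_ts_py p ts)

-- ===== LEMMAS AND PROOFS =====

-- A's loop equals B's two-pass decomposition, for any incoming cross flag,
-- provided every target not preceded by a strong one is a pair.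
theorem relAloop_eq (ps pe : Int) (ts : List (List Int)) (cross : Bool)
    (h : ∀ i < ts.length, (ts.getD i []).length = 2 ∨ ∃ j < i, strongT ps pe (ts.getD j []) = true) :
    relAloop ps pe ts cross =
      match firstStrong ps pe ts with
      | some r => r
      | none => if cross || ts.any (crossCond ps pe) then "cross" else "out" := by
  induction ts generalizing cross with
  | nil => simp [relAloop, firstStrong]
  | cons t rest ih =>
    have ht : t.length = 2 := by
      rcases h 0 (by simp) with h0 | ⟨j, hj, _⟩
      · simpa using h0
      · omega
    match t, ht with
    | [s, e], _ =>
      simp only [relAloop, firstStrong, classifyB, crossCond, List.any_cons]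
      by_cases h1 : s = ps ∧ e = pe
      · simp [h1]
      · by_cases h2 : s ≥ ps ∧ e ≤ pe
        · simp [h1, h2]
        · by_cases h3 : s ≤ ps ∧ e ≥ pe
          · simp [h1, h2, h3]
          · have hns : strongT ps pe [s, e] = false := by
              simp only [strongT, decide_eq_false_iff_not]
              tauto
            have hrest : ∀ i < rest.length,
                (rest.getD i []).length = 2 ∨ ∃ j < i, strongT ps pe (rest.getD j []) = true := by
              intro i hi
              rcases h (i + 1) (by simp; omega) with hl | ⟨j, hj, hs⟩
              · left; simpa using hl
              · right
                match j, hj, hs with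
                | 0, _, hs => simp [hns] at hs
                | k + 1, hjk, hs => exact ⟨k, by omega, by simpa using hs⟩
            by_cases h4 : (e ≤ pe ∧ e ≥ ps) ∨ (s ≥ ps ∧ s ≤ pe)
            · rw [if_neg h1, if_neg h2, if_neg h3, if_pos h4, ih true hrest]
              cases firstStrong ps pe rest <;> simp [h1, h2, h3, h4]
            · rw [if_neg h1, if_neg h2, if_neg h3, if_neg h4, ih cross hrest]
              cases firstStrong ps pe rest <;> simp [h1, h2, h3, h4]

theorem relation_p_and_ts_py_spec : Claim_equal_relation_p_and_ts_py := by
  intro p ts _ hpre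
  unfold Spec_relation_p_and_ts_py relation_p_and_ts_py relation_p_and_ts_py_alt
  match p, hpre with
  | [], hpre => exact hpre.elim
  | [_], hpre => exact hpre.elim
  | _ :: _ :: _ :: _, hpre => exact hpre.elim
  | [ps, pe], hpre =>
    show relAloop ps pe ts false =
      (match firstStrong ps pe ts with
       | some r => r
       | none => if ts.any (crossCond ps pe) then "cross" else "out")
    rw [relAloop_eq ps pe ts false hpre]
    simp
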